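-- pv_equiv track=rewrite | github.com/kermitt2/delft | delft/utilities/preprocess.py | calculate_cardinality
-- ===== SOURCE A (Python) =====
-- def calculate_cardinality(feature_vector, indices=None):
--     """
--     Calculate cardinality of each feature.
--
--     Args:
--         feature_vector: three dimensional vector with features
--         indices: list of indices of the features to be extracted
--
--     Returns:
--         a map where each key is the index of the feature and the value is a map
--         feature_value -> value_index.
--
--     NOTE: the features are indexed from 1 to n + 1. The 0 value is reserved as padding
--     """
--     columns_length = []
--     index = 0
--     if not len(feature_vector) > 0:
--         return []
--
--     for index_column in range(index, len(feature_vector[0][0])):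
--         if indices and index_column not in indices:
--             index += 1
--             continue
--
--         values = set()
--         for index_document in range(0, len(feature_vector)):
--             for index_row in range(0, len(feature_vector[index_document])):
--                 value = feature_vector[index_document][index_row][index_column]
--                 if value != " ":
--                     values.add(value)
--
--         values = sorted(values)
--         values_cardinality = len(values)
--
--         values_list = list(values)
--         values_to_int = {}
--         for val_num in range(0, values_cardinality):
--             # We reserve the 0 for the unseen features so the indexes will go from 1 to cardinality + 1
--             values_to_int[values_list[val_num]] = val_num + 1
--
--         columns_length.append((index, values_to_int))
--         index += 1
--
--     return columns_length
-- ===== SOURCE B (Python) =====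
-- def calculate_cardinality(feature_vector, indices=None):
--     if not feature_vector:
--         return []
--     cols = [c for c in range(len(feature_vector[0][0])) if not indices or c in indices]
--     pairs = []
--     for doc in feature_vector:
--         for row in doc:
--             for c in cols:
--                 v = row[c]
--                 if v != " ":
--                     pairs.append((c, v))
--     pairs.sort()
--     groups = {c: [] for c in cols}
--     for c, v in pairs:
--         groups[c].append(v)
--     result = []
--     for c in cols:
--         mapping = {}
--         prev = None
--         rank = 0
--         for v in groups[c]:
--             if v != prev:
--                 rank += 1
--                 mapping[v] = rank
--                 prev = v
--         result.append((c, mapping))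
--     return result
-- ===== Notes on version B (the rewrite author's own statement) =====
-- stated objective: alternative
-- what changed: Replaces A's per-column repeated full scans building a set, sorting it and ranking by index with a flat-pair pipeline: one document/row traversal collects (column, value) pairs for all selected columns, a single global sort of that pair list (tuple order) replaces the per-column sorted() calls, values are grouped by column in one scan, and each mapping is produced by a run-length dedup scan assigning ranks 1..cardinality; no sets are used.
import Mathlib
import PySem

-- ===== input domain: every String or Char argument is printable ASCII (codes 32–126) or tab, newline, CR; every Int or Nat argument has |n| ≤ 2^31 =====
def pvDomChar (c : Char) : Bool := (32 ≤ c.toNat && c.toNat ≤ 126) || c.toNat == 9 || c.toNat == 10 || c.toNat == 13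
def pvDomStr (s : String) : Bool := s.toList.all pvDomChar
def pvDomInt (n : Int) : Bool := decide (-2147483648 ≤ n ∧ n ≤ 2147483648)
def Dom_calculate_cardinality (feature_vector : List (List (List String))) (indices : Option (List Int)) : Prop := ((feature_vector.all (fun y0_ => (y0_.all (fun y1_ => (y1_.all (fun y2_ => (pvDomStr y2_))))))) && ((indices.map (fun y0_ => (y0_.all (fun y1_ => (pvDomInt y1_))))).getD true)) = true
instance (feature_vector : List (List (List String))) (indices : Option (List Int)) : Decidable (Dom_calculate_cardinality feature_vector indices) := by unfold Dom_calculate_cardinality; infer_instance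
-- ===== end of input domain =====

-- B replaces A's per-column repeated scans + set + sorted() + index loop by ONE traversal
-- collecting a flat (column, value) pair list, ONE global sort of that list, grouping by
-- column, and a run-length dedup scan assigning ranks; objective: alternative algorithm.

-- ===== PORT A =====
-- A's skip test: 'if indices and index_column not in indices'
def pvASkip (indices : Option (List Int)) (index_column : Int) : Bool :=
  match indices with
  | some l => decide (l ≠ []) && !(l.contains index_column)
  | none => false

-- the inner double loop of A collecting the set of values of column index_column
def pvAInner (feature_vector : List (List (List String))) (index_column : Int) : PySem.Set String :=
  (PySem.List.pyRange 0 (feature_vector.length : Int) 1).foldl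
    (fun values index_document =>
      (PySem.List.pyRange 0 ((PySem.List.pyGetD feature_vector index_document []).length : Int) 1).foldl
        (fun values index_row =>
          if PySem.List.pyGetD (PySem.List.pyGetD (PySem.List.pyGetD feature_vector index_document []) index_row []) index_column " " ≠ " "
          then PySem.Set.add values (PySem.List.pyGetD (PySem.List.pyGetD (PySem.List.pyGetD feature_vector index_document []) index_row []) index_column " ")
          else values)
        values)
    PySem.Set.empty

-- the values_to_int loop of A over the sorted value list
def pvAValsToInt (values_list : List String) : PySem.Dict String Int :=
  (PySem.List.pyRange 0 (values_list.length : Int) 1).foldl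
    (fun d val_num => d.insert (PySem.List.pyGetD values_list val_num "") (val_num + 1))
    PySem.Dict.empty

def calculate_cardinality (feature_vector : List (List (List String))) (indices : Option (List Int)) : List (Int × (List (String × Int))) :=
  if ¬ (feature_vector.length > 0) then []
  else
    ((PySem.List.pyRange 0 (((PySem.List.pyGetD (PySem.List.pyGetD feature_vector 0 []) 0 []).length : Int)) 1).foldl
      (fun (st : List (Int × (List (String × Int))) × Int) index_column =>
        if pvASkip indices index_column then (st.1, st.2 + 1)
        else (st.1 ++ [(st.2, (pvAValsToInt (PySem.List.sorted (pvAInner feature_vector index_column) (fun x => x) false)).items)], st.2 + 1))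
      ([], 0)).1

-- ===== PORT B =====
-- B's selected columns '[c for c in range(ncols) if not indices or c in indices]'
def pvBCols (feature_vector : List (List (List String))) (indices : Option (List Int)) : List Int :=
  (PySem.List.pyRange 0 ((PySem.List.pyGetD (PySem.List.pyGetD feature_vector 0 []) 0 []).length : Int) 1).filter
    (fun c => match indices with
              | some l => l.isEmpty || l.contains c
              | none => true)

-- B's single traversal appending (column, value) pairs for the non-' ' cells
def pvBPairs (feature_vector : List (List (List String))) (cols : List Int) : List (Int × String) :=
  feature_vector.foldl
    (fun ps doc => doc.foldl
      (fun ps row => cols.foldl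
        (fun ps c =>
          if PySem.List.pyGetD row c " " ≠ " "
          then ps ++ [(c, PySem.List.pyGetD row c " ")]
          else ps)
        ps)
      ps)
    []

-- 'pairs.sort()' — Python tuple order = lexicographic on (Int, String)
def pvBSortedPairs (feature_vector : List (List (List String))) (cols : List Int) : List (Int × String) :=
  PySem.List.sorted (pvBPairs feature_vector cols) (fun p => toLex p) false

-- 'groups = {c: [] for c in cols}; for c, v in pairs: groups[c].append(v)'
def pvBGroups (pairs : List (Int × String)) (cols : List Int) : PySem.Dict Int (List String) :=
  pairs.foldl (fun d p => d.modify p.1 [] (fun l => l ++ [p.2]))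
    (cols.foldl (fun d c => d.insert c []) PySem.Dict.empty)

-- B's run-length dedup scan assigning ranks 1..cardinality
def pvBScan : List String → PySem.Dict String Int → Option String → Int → PySem.Dict String Int
  | [], mapping, _, _ => mapping
  | v :: t, mapping, prev, rank =>
    if some v ≠ prev then pvBScan t (mapping.insert v (rank + 1)) (some v) (rank + 1)
    else pvBScan t mapping prev rank

def calculate_cardinality_alt (feature_vector : List (List (List String))) (indices : Option (List Int)) : List (Int × (List (String × Int))) :=
  if feature_vector = [] then []
  else
    (pvBCols feature_vector indices).foldl
      (fun res c => res ++ [(c,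
        (pvBScan ((pvBGroups (pvBSortedPairs feature_vector (pvBCols feature_vector indices)) (pvBCols feature_vector indices)).getD c [])
          PySem.Dict.empty none 0).items)])
      []

-- ===== PRECONDITION & SPEC =====
def pvSelected (indices : Option (List Int)) (c : Int) : Bool :=
  match indices with
  | some l => l.isEmpty || l.contains c
  | none => true

-- Pre_ excludes exactly the inputs where the Python raises IndexError: a nonempty
-- feature_vector whose first document is empty (feature_vector[0][0]), or some row
-- shorter than a selected column index (feature_vector[d][r][c]).
def Pre_calculate_cardinality (feature_vector : List (List (List String))) (indices : Option (List Int)) : Prop :=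
  feature_vector = [] ∨
  (feature_vector.headD [] ≠ [] ∧
    ∀ doc ∈ feature_vector, ∀ row ∈ doc,
      ∀ c : Nat, c < ((feature_vector.headD []).headD []).length →
        pvSelected indices (c : Int) = true →
        c < row.length)
instance (feature_vector : List (List (List String))) (indices : Option (List Int)) : Decidable (Pre_calculate_cardinality feature_vector indices) := by unfold Pre_calculate_cardinality; infer_instance
def pvWitness_calculate_cardinality : List (List (List String)) × Option (List Int) :=
  ([[["a", " "], ["b", "a"]], [[" ", "c"]]], none)

def Spec_calculate_cardinality (feature_vector : List (List (List String))) (indices : Option (List Int)) (out : List (Int × (List (String × Int)))) : Prop := out = calculate_cardinality_alt feature_vector indices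
instance (feature_vector : List (List (List String))) (indices : Option (List Int)) (out : List (Int × (List (String × Int)))) : Decidable (Spec_calculate_cardinality feature_vector indices out) := by unfold Spec_calculate_cardinality; infer_instance

-- ===== CLAIM (what is proved, stated in full; the proofs are below) =====
def Claim_equal_calculate_cardinality : Prop := ∀ (feature_vector : List (List (List String))) (indices : Option (List Int)), Dom_calculate_cardinality feature_vector indices → Pre_calculate_cardinality feature_vector indices → Spec_calculate_cardinality feature_vector indices (calculate_cardinality feature_vector indices)

-- ===== LEMMAS AND PROOFS =====

theorem pvBCols_eq_filter (fv : List (List (List String))) (ind : Option (List Int)) :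
    pvBCols fv ind = (PySem.List.pyRange 0 ((PySem.List.pyGetD (PySem.List.pyGetD fv 0 []) 0 []).length : Int) 1).filter (fun c => !(pvASkip ind c)) := by
  unfold pvBCols pvASkip
  cases ind with
  | none => simp
  | some l =>
    cases l with
    | nil => simp
    | cons a t =>
      have he : (a :: t).isEmpty = false := rfl
      have hne : (a :: t) ≠ [] := by simp
      simp [he, hne]

-- A's outer loop with its (acc, index) pair state, as filter+map
theorem pair_fold (g : Int → List (String × Int)) (skip : Int → Bool) :
    ∀ (k : Nat) (a : Int) (acc : List (Int × List (String × Int))),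
      ((PySem.List.pyRange a (a + (k : Int)) 1).foldl
        (fun st c => if skip c then (st.1, st.2 + 1) else (st.1 ++ [(st.2, g c)], st.2 + 1)) (acc, a)).1
      = acc ++ ((PySem.List.pyRange a (a + (k : Int)) 1).filter (fun c => !(skip c))).map (fun c => (c, g c)) := by
  intro k
  induction k with
  | zero => intro a acc; simp [PySem.List.pyRange_one_eq_nil (le_refl a)]
  | succ k ih =>
    intro a acc
    have hb : a + ((k + 1 : Nat) : Int) = (a + 1) + (k : Int) := by push_cast; ring
    rw [hb, PySem.List.pyRange_one_cons (by omega)]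
    by_cases hs : skip a = true
    · simp only [List.foldl_cons, List.filter_cons, hs, if_pos, Bool.not_true]
      simpa using ih (a + 1) acc
    · simp only [Bool.not_eq_true] at hs
      simp only [List.foldl_cons, List.filter_cons, hs, Bool.not_false, Bool.false_eq_true,
        if_false, if_true, List.map_cons]
      rw [ih (a + 1) (acc ++ [(a, g a)])]
      simp

-- A's range-indexed double scan is the fold over the lists themselves
theorem pvAInner_eq_fold (fv : List (List (List String))) (c : Int) :
    pvAInner fv c
    = fv.foldl (fun values doc => doc.foldl (fun values row =>
        if PySem.List.pyGetD row c " " ≠ " "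
        then PySem.Set.add values (PySem.List.pyGetD row c " ")
        else values) values) PySem.Set.empty := by
  unfold pvAInner
  rw [PySem.List.foldl_pyRange_zero_pyGetD' fv []
      (fun values doc => (PySem.List.pyRange 0 (doc.length : Int) 1).foldl
        (fun values index_row =>
          if PySem.List.pyGetD (PySem.List.pyGetD doc index_row []) c " " ≠ " "
          then PySem.Set.add values (PySem.List.pyGetD (PySem.List.pyGetD doc index_row []) c " ")
          else values) values) PySem.Set.empty]
  have hF : (fun (values : PySem.Set String) (doc : List (List String)) =>
      (PySem.List.pyRange 0 (doc.length : Int) 1).foldl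
        (fun values index_row =>
          if PySem.List.pyGetD (PySem.List.pyGetD doc index_row []) c " " ≠ " "
          then PySem.Set.add values (PySem.List.pyGetD (PySem.List.pyGetD doc index_row []) c " ")
          else values) values)
    = (fun values doc => doc.foldl (fun values row =>
        if PySem.List.pyGetD row c " " ≠ " "
        then PySem.Set.add values (PySem.List.pyGetD row c " ")
        else values) values) := by
    funext values doc
    exact PySem.List.foldl_pyRange_zero_pyGetD' doc []
      (fun values row =>
        if PySem.List.pyGetD row c " " ≠ " "
        then PySem.Set.add values (PySem.List.pyGetD row c " ")
        else values) values
  rw [hF]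

-- generic fold preservation
theorem foldl_pres {σ α : Type} (P : σ → Prop) (f : σ → α → σ)
    (h : ∀ s a, P s → P (f s a)) :
    ∀ (xs : List α) (s : σ), P s → P (xs.foldl f s) := by
  intro xs
  induction xs with
  | nil => intro s hs; exact hs
  | cons x rest ih => intro s hs; exact ih _ (h s x hs)

theorem pvAInner_nodup (fv : List (List (List String))) (c : Int) : (pvAInner fv c).Nodup := by
  rw [pvAInner_eq_fold]
  refine foldl_pres (P := fun (s : PySem.Set String) => s.Nodup) _ (fun s doc hs => ?_) fv PySem.Set.empty List.nodup_nil
  refine foldl_pres (P := fun (s : PySem.Set String) => s.Nodup) _ (fun s row hs => ?_) doc s hs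
  by_cases hv : PySem.List.pyGetD row c " " ≠ " "
  · rw [if_pos hv]; exact PySem.Set.nodup_add s _ hs
  · rw [if_neg hv]; exact hs

-- generic parallel-fold preservation
theorem foldl_par {σ τ α : Type} (R : σ → τ → Prop) (f : σ → α → σ) (g : τ → α → τ)
    (h : ∀ s t a, R s t → R (f s a) (g t a)) :
    ∀ (xs : List α) (s : σ) (t : τ), R s t → R (xs.foldl f s) (xs.foldl g t) := by
  intro xs
  induction xs with
  | nil => intro s t hst; exact hst
  | cons x rest ih => intro s t hst; exact ih _ _ (h s t x hst)

-- membership in B's per-row column loop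
theorem rowPairs_mem (row : List String) (c : Int) (x : String) :
    ∀ (cols : List Int) (ps : List (Int × String)),
    ((c, x) ∈ cols.foldl (fun ps c' =>
        if PySem.List.pyGetD row c' " " ≠ " "
        then ps ++ [(c', PySem.List.pyGetD row c' " ")]
        else ps) ps)
    ↔ (c, x) ∈ ps ∨ (c ∈ cols ∧ PySem.List.pyGetD row c " " ≠ " " ∧ x = PySem.List.pyGetD row c " ") := by
  intro cols
  induction cols with
  | nil => intro ps; simp
  | cons c0 rest ih =>
    intro ps
    simp only [List.foldl_cons]
    rw [ih]
    by_cases he : c = c0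
    · subst he
      by_cases hv : PySem.List.pyGetD row c " " ≠ " "
      · simp only [if_pos hv, List.mem_append, Prod.mk.injEq, List.mem_cons]
        tauto
      · simp only [if_neg hv, List.mem_cons]
        tauto
    · by_cases hv0 : PySem.List.pyGetD row c0 " " ≠ " "
      · simp only [if_pos hv0, List.mem_append, Prod.mk.injEq, List.mem_cons]
        tauto
      · simp only [if_neg hv0, List.mem_cons]
        tauto

-- A's column-value set and B's flat pair list contain the same column-c values
theorem pairs_row_step (cols : List Int) (c : Int) (hc : c ∈ cols) (row : List String)
    (s : PySem.Set String) (ps : List (Int × String)) (hR : ∀ y, y ∈ s ↔ (c, y) ∈ ps) :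
    ∀ y, y ∈ (if PySem.List.pyGetD row c " " ≠ " "
              then PySem.Set.add s (PySem.List.pyGetD row c " ") else s)
        ↔ (c, y) ∈ cols.foldl (fun ps c' =>
              if PySem.List.pyGetD row c' " " ≠ " "
              then ps ++ [(c', PySem.List.pyGetD row c' " ")]
              else ps) ps := by
  intro y
  rw [rowPairs_mem row c y cols ps]
  by_cases hv : PySem.List.pyGetD row c " " ≠ " "
  · rw [if_pos hv, PySem.Set.mem_add, hR y]
    constructor
    · rintro (h | rfl)
      · exact Or.inl h
      · exact Or.inr ⟨hc, hv, rfl⟩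
    · rintro (h | ⟨_, _, rfl⟩)
      · exact Or.inl h
      · exact Or.inr rfl
  · rw [if_neg hv, hR y]
    constructor
    · exact Or.inl
    · rintro (h | ⟨_, hne, _⟩)
      · exact h
      · exact absurd hne hv

theorem mem_pvAInner_iff_pairs (fv : List (List (List String))) (cols : List Int) (c : Int)
    (hc : c ∈ cols) (x : String) :
    x ∈ pvAInner fv c ↔ (c, x) ∈ pvBPairs fv cols := by
  rw [pvAInner_eq_fold]
  unfold pvBPairs
  have h := foldl_par (R := fun (s : PySem.Set String) (ps : List (Int × String)) => ∀ y, y ∈ s ↔ (c, y) ∈ ps)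
    (f := fun s doc => doc.foldl (fun values row =>
        if PySem.List.pyGetD row c " " ≠ " "
        then PySem.Set.add values (PySem.List.pyGetD row c " ")
        else values) s)
    (g := fun ps doc => doc.foldl (fun ps row => cols.foldl (fun ps c' =>
        if PySem.List.pyGetD row c' " " ≠ " "
        then ps ++ [(c', PySem.List.pyGetD row c' " ")]
        else ps) ps) ps)
    (fun s ps doc hR =>
      foldl_par (R := fun (s : PySem.Set String) (ps : List (Int × String)) => ∀ y, y ∈ s ↔ (c, y) ∈ ps)
        (f := fun s row =>
          if PySem.List.pyGetD row c " " ≠ " "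
          then PySem.Set.add s (PySem.List.pyGetD row c " ") else s)
        (g := fun ps row => cols.foldl (fun ps c' =>
          if PySem.List.pyGetD row c' " " ≠ " "
          then ps ++ [(c', PySem.List.pyGetD row c' " ")]
          else ps) ps)
        (fun s ps row hR => pairs_row_step cols c hc row s ps hR)
        doc s ps hR)
    fv PySem.Set.empty [] (fun y => by simp [PySem.Set.empty])
  exact h x

-- projection of B's grouping loop
theorem group_getD (c : Int) :
    ∀ (ps : List (Int × String)) (d : PySem.Dict Int (List String)),
      (ps.foldl (fun d p => d.modify p.1 [] (fun l => l ++ [p.2])) d).getD c []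
      = d.getD c [] ++ (ps.filter (fun p => decide (p.1 = c))).map (·.2) := by
  intro ps
  induction ps with
  | nil => intro d; simp
  | cons p t ih =>
    intro d
    simp only [List.foldl_cons, List.filter_cons]
    rw [ih]
    by_cases he : p.1 = c
    · rw [PySem.Dict.getD_modify, if_pos he.symm]
      simp [he]
    · rw [PySem.Dict.getD_modify, if_neg (fun h => he h.symm)]
      simp [he]

-- the seeded dict maps every key to []
theorem seed_getD (c : Int) :
    ∀ (cols : List Int) (d : PySem.Dict Int (List String)),
      (∀ x, d.getD x [] = []) →
      (cols.foldl (fun d c' => d.insert c' []) d).getD c [] = [] := by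
  intro cols
  induction cols with
  | nil => intro d h; exact h c
  | cons c0 rest ih =>
    intro d h
    simp only [List.foldl_cons]
    refine ih _ (fun x => ?_)
    rw [PySem.Dict.getD_insert]
    split
    · rfl
    · exact h x

-- the run-length filter kept by B's scan
def pvKeep (prev : Option String) : List String → List String
  | [] => []
  | v :: t => if some v ≠ prev then v :: pvKeep (some v) t else pvKeep prev t

-- B's scan is the enumerate fold over the kept values
theorem pvBScan_eq_enum :
    ∀ (l : List String) (d : PySem.Dict String Int) (prev : Option String) (r : Int),
      pvBScan l d prev r
      = (PySem.List.enumerate (pvKeep prev l) r).foldl (fun m p => m.insert p.2 (p.1 + 1)) d := by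
  intro l
  induction l with
  | nil => intro d prev r; rfl
  | cons v t ih =>
    intro d prev r
    unfold pvBScan pvKeep
    by_cases hp : some v ≠ prev
    · rw [if_pos hp, if_pos hp, PySem.List.enumerate_cons, List.foldl_cons, ih]
    · rw [if_neg hp, if_neg hp, ih]

-- properties of pvKeep on a (≤)-sorted list with a lower bound
theorem pvKeep_props :
    ∀ (l : List String), l.Pairwise (· ≤ ·) →
    ∀ (prev : Option String), (∀ p, prev = some p → ∀ x ∈ l, p ≤ x) →
      (pvKeep prev l).Pairwise (· < ·) ∧ (∀ x, x ∈ pvKeep prev l ↔ x ∈ l ∧ prev ≠ some x) := by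
  intro l
  induction l with
  | nil => intro _ prev _; exact ⟨List.Pairwise.nil, by simp [pvKeep]⟩
  | cons v t ih =>
    intro h prev hlb
    rcases List.pairwise_cons.mp h with ⟨hv, ht⟩
    unfold pvKeep
    by_cases hp : some v ≠ prev
    · rw [if_pos hp]
      rcases ih ht (some v) (fun p hps x hx => by injection hps with hh; exact hh ▸ hv x hx) with ⟨hkpw, hkmem⟩
      constructor
      · refine List.pairwise_cons.mpr ⟨fun y hy => ?_, hkpw⟩
        rcases (hkmem y).mp hy with ⟨hyt, hne⟩
        exact lt_of_le_of_ne (hv y hyt) (fun hh => hne (congrArg some hh.symm).symm)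
      · intro x
        simp only [List.mem_cons, hkmem]
        constructor
        · rintro (rfl | ⟨hxt, hne⟩)
          · exact ⟨Or.inl rfl, fun hh => hp hh.symm⟩
          · refine ⟨Or.inr hxt, fun hpx => ?_⟩
            have hxv : x ≤ v := hlb x hpx v (by simp)
            have hvx : v ≤ x := hv x hxt
            exact hne (congrArg some (le_antisymm hvx hxv))
        · rintro ⟨(rfl | hxt), hne⟩
          · exact Or.inl rfl
          · by_cases hxv : x = v
            · exact Or.inl hxv
            · exact Or.inr ⟨hxt, fun hh => hxv (Option.some.inj hh).symm⟩
    · rw [if_neg hp]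
      have hp : some v = prev := not_ne_iff.mp hp
      have hlb' : ∀ p, prev = some p → ∀ x ∈ t, p ≤ x := by
        intro p hps x hx
        have hpv : p = v := by rw [hps] at hp; exact (Option.some.inj hp).symm
        exact hpv ▸ hv x hx
      rcases ih ht prev hlb' with ⟨hkpw, hkmem⟩
      refine ⟨hkpw, fun x => ?_⟩
      rw [hkmem]
      simp only [List.mem_cons]
      constructor
      · rintro ⟨hxt, hne⟩; exact ⟨Or.inr hxt, hne⟩
      · rintro ⟨(rfl | hxt), hne⟩
        · exact absurd hp.symm hne
        · exact ⟨hxt, hne⟩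

-- A's index loop building values_to_int is the enumerate fold
theorem mapping_eq (l : List String) :
    pvAValsToInt l = (PySem.List.enumerate l 0).foldl (fun m p => m.insert p.2 (p.1 + 1)) PySem.Dict.empty := by
  unfold pvAValsToInt
  rw [PySem.List.enumerate_eq_map_pyRange l ""]
  rw [List.foldl_map]
  rfl

-- the column-c values extracted from the sorted pair list
theorem sorted_inner_eq_keep (fv : List (List (List String))) (cols : List Int) (c : Int) (hc : c ∈ cols) :
    PySem.List.sorted (pvAInner fv c) (fun x => x) false
    = pvKeep none (((pvBSortedPairs fv cols).filter (fun p => decide (p.1 = c))).map (·.2)) := by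
  set F := ((pvBSortedPairs fv cols).filter (fun p => decide (p.1 = c))).map (·.2) with hF
  have hFpw : F.Pairwise (· ≤ ·) := by
    rw [hF]
    rw [List.pairwise_map]
    have h1 : (pvBSortedPairs fv cols).Pairwise (fun a b => toLex a ≤ toLex b) :=
      PySem.List.sorted_pairwise (pvBPairs fv cols) (fun p => toLex p)
    refine List.Pairwise.imp_of_mem ?_ (h1.filter _)
    intro a b ha hb hle
    have ha' : a.1 = c := by simpa using (List.mem_filter.mp ha).2
    have hb' : b.1 = c := by simpa using (List.mem_filter.mp hb).2
    rcases Prod.Lex.le_iff.mp hle with h | h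
    · exfalso
      have hcc : a.1 < b.1 := h
      rw [ha', hb'] at hcc
      exact lt_irrefl c hcc
    · exact h.2
  have hFmem : ∀ x, x ∈ F ↔ (c, x) ∈ pvBPairs fv cols := by
    intro x
    rw [hF]
    simp only [List.mem_map, List.mem_filter, decide_eq_true_eq]
    constructor
    · rintro ⟨p, ⟨hp, hp1⟩, hp2⟩
      have : p = (c, x) := Prod.ext hp1 hp2
      rw [this] at hp
      exact (PySem.List.mem_sorted ..).mp hp
    · intro h
      exact ⟨(c, x), ⟨(PySem.List.mem_sorted ..).mpr h, rfl⟩, rfl⟩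
  rcases pvKeep_props F hFpw none (by simp) with ⟨hkpw, hkmem⟩
  have hknd : (pvKeep none F).Nodup := hkpw.imp ne_of_lt
  refine PySem.List.sorted_eq_of_perm_of_pairwise_lt _ _ _ ?_ hkpw
  refine (List.perm_ext_iff_of_nodup hknd (pvAInner_nodup fv c)).mpr (fun a => ?_)
  rw [hkmem a, mem_pvAInner_iff_pairs fv cols c hc a, hFmem a]
  simp

theorem calc_card_eq : ∀ (feature_vector : List (List (List String))) (indices : Option (List Int)),
    calculate_cardinality feature_vector indices = calculate_cardinality_alt feature_vector indices := by
  intro fv ind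
  by_cases hfv : fv = []
  · subst hfv; rfl
  · unfold calculate_cardinality calculate_cardinality_alt
    have hlen : fv.length > 0 := List.length_pos_of_ne_nil hfv
    rw [if_neg (by omega), if_neg hfv]
    rw [PySem.List.foldl_append_singleton_eq_map]
    rw [pvBCols_eq_filter fv ind]
    have hzero : (((PySem.List.pyGetD (PySem.List.pyGetD fv 0 []) 0 []).length : Int)) = (0 : Int) + ((PySem.List.pyGetD (PySem.List.pyGetD fv 0 []) 0 []).length : Int) := by ring
    rw [hzero]
    rw [pair_fold (fun c => (pvAValsToInt (PySem.List.sorted (pvAInner fv c) (fun x => x) false)).items)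
        (pvASkip ind) (PySem.List.pyGetD (PySem.List.pyGetD fv 0 []) 0 []).length 0 []]
    simp only [List.nil_append]
    refine List.map_congr_left (fun c hcmem => ?_)
    rw [← hzero, ← pvBCols_eq_filter fv ind] at hcmem ⊢
    have hg : (pvBGroups (pvBSortedPairs fv (pvBCols fv ind)) (pvBCols fv ind)).getD c []
        = ((pvBSortedPairs fv (pvBCols fv ind)).filter (fun p => decide (p.1 = c))).map (·.2) := by
      unfold pvBGroups
      rw [group_getD c _ _, seed_getD c _ PySem.Dict.empty (fun x => rfl)]
      simp
    rw [hg, pvBScan_eq_enum, ← mapping_eq, ← sorted_inner_eq_keep fv (pvBCols fv ind) c hcmem]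

-- ===== VERDICT (by name: the statement is the Claim_ definition above) =====
theorem calculate_cardinality_spec : Claim_equal_calculate_cardinality := by
  intro fv ind _ _
  exact calc_card_eq fv ind
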